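-- pv_equiv track=rewrite | github.com/OlaszPL/Introduction_to_computer_science_course | Kolokwia 2/zadA4_2022.py | place
-- ===== SOURCE A (Python) =====
-- def place(T):
--     n = len(T)
--     szachowane = [[False for _ in range(n)] for _ in range(n)]
--     szachowanie = [(-2, 1), (-1, 2), (1, 2), (2, 1), (2, -1), (1, -2), (-1, -2), (-2, -1)]
--
--     for r in range(n): # zaznaczy pola szachowane przez skoczki co sa juz wczesniej na szachownicy
--         for c in range(n):
--             if T[r][c] == 1:
--                 for szach in szachowanie:
--                     if -1 < r + szach[0] < n and -1 < c + szach[1] < n: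
--                         szachowane[r + szach[0]][c + szach[1]] = True
--
--     odleglosc = float('inf')
--     ilosc_zszachownaych = -float('inf')
--     res_r, res_c = 0, 0
--
--     for r in range(n):
--         for c in range(n):
--             if T[r][c] == 0:
--                 tmp_cnt = 0
--                 for szach in szachowanie:
--                     if -1 < r + szach[0] < n and -1 < c + szach[1] < n and not szachowane[r + szach[0]][c + szach[1]]:
--                         tmp_cnt += 1
--                 if tmp_cnt > 0:
--                     tmp_odleglosc = max(abs(r - (n // 2)), abs(c - (n // 2)))
--                     if tmp_odleglosc <= odleglosc and tmp_cnt >= ilosc_zszachownaych: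
--                         odleglosc = tmp_odleglosc
--                         ilosc_zszachownaych = tmp_cnt
--                         res_r, res_c = r, c
--
--     return res_r, res_c
-- ===== SOURCE B (Python) =====
-- def place(T):
--     n = len(T)
--     moves = [(-2, 1), (-1, 2), (1, 2), (2, 1), (2, -1), (1, -2), (-1, -2), (-2, -1)]
--
--     def attacked(x, y):
--         # square (x, y) is attacked iff a knight already sits a knight-move away
--         # (the move set is symmetric, so no precomputed table is needed)
--         return any(0 <= x + dx < n and 0 <= y + dy < n and T[x + dx][y + dy] == 1
--                    for dx, dy in moves)
--
--     odleglosc = float('inf')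
--     ilosc_zszachownaych = -float('inf')
--     res_r, res_c = 0, 0
--
--     for r in range(n):
--         for c in range(n):
--             if T[r][c] == 0:
--                 tmp_cnt = sum(1 for dx, dy in moves
--                               if 0 <= r + dx < n and 0 <= c + dy < n
--                               and not attacked(r + dx, c + dy))
--                 if tmp_cnt > 0:
--                     tmp_odleglosc = max(abs(r - (n // 2)), abs(c - (n // 2)))
--                     if tmp_odleglosc <= odleglosc and tmp_cnt >= ilosc_zszachownaych:
--                         odleglosc = tmp_odleglosc
--                         ilosc_zszachownaych = tmp_cnt
--                         res_r, res_c = r, c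
--
--     return res_r, res_c
-- ===== Notes on version B (the rewrite author's own statement) =====
-- stated objective: alternative
-- what changed: B drops A's precomputed n*n `szachowane` (attacked) table and instead decides on the fly, for each in-bounds knight neighbor of a candidate empty cell, whether that square is attacked by rescanning the 8 knight offsets for a knight (the move set is symmetric), keeping the same candidate order and selection rule.
import Mathlib
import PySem

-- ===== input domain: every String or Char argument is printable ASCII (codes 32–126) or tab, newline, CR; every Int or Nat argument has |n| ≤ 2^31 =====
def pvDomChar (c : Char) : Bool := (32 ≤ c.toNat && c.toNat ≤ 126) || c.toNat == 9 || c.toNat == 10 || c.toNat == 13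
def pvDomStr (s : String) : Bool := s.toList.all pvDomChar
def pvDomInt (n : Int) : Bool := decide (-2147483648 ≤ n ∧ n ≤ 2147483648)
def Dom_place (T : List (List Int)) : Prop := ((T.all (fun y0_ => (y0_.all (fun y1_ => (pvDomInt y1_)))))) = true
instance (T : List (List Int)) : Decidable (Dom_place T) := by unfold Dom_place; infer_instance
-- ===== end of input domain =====

-- B replaces A's precomputed `szachowane` (attacked) table by an on-the-fly rescan of the 8
-- knight offsets from each queried square (the move set is symmetric); same result, no table.

-- ===== PORT A =====
-- the 8 knight offsets (the literal list `szachowanie`)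
def pvOffs : List (Int × Int) := [(-2, 1), (-1, 2), (1, 2), (2, 1), (2, -1), (1, -2), (-1, -2), (-2, -1)]

-- T[r][c]; indices are always in range under Pre_place (rows at least as long as T), so the default is never read
def pvGetT (T : List (List Int)) (r c : Int) : Int := PySem.List.pyGetD (PySem.List.pyGetD T r []) c 0

-- the bounds test `-1 < x < n and -1 < y < n` of A
def pvInbA (n x y : Int) : Bool := decide (-1 < x ∧ x < n ∧ -1 < y ∧ y < n)

-- szachowane[x][y] (guards keep x, y in range, so the defaults are never read)
def pvGetSz (g : List (List Bool)) (x y : Int) : Bool := PySem.List.pyGetD (PySem.List.pyGetD g x []) y false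

-- the in-place assignment `szachowane[x][y] = True`, ported as a functional update
def pvSetSz (g : List (List Bool)) (x y : Int) : List (List Bool) :=
  PySem.List.pySetD g x (PySem.List.pySetD (PySem.List.pyGetD g x []) y true)

-- `[[False for _ in range(n)] for _ in range(n)]`
def pvInit (n : Int) : List (List Bool) :=
  (PySem.List.pyRange 0 n 1).map (fun _ => (PySem.List.pyRange 0 n 1).map (fun _ => false))

-- the first double loop of A marking the attacked squares
def pvBuild (T : List (List Int)) (n : Int) : List (List Bool) :=
  (PySem.List.pyRange 0 n 1).foldl (fun g r =>
    (PySem.List.pyRange 0 n 1).foldl (fun g c =>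
      if pvGetT T r c == 1 then
        pvOffs.foldl (fun g d =>
          if pvInbA n (r + d.1) (c + d.2) then pvSetSz g (r + d.1) (c + d.2) else g) g
      else g) g) (pvInit n)

-- the `tmp_cnt` loop of A (table lookups)
def pvCntA (n : Int) (g : List (List Bool)) (r c : Int) : Int :=
  pvOffs.foldl (fun cnt d =>
    if pvInbA n (r + d.1) (c + d.2) && !(pvGetSz g (r + d.1) (c + d.2)) then cnt + 1 else cnt) 0

-- float('inf') / -float('inf') of the running state are modelled as `none` (only ever compared)
def pvLeInf (t : Int) (o : Option Int) : Bool := match o with | none => true | some v => decide (t ≤ v)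
def pvGeNegInf (t : Int) (o : Option Int) : Bool := match o with | none => true | some v => decide (v ≤ t)

def place (T : List (List Int)) : Int × Int :=
  let n : Int := PySem.List.len T
  let g := pvBuild T n
  let st : Option Int × Option Int × Int × Int :=
    (PySem.List.pyRange 0 n 1).foldl (fun st r =>
      (PySem.List.pyRange 0 n 1).foldl (fun st c =>
        if pvGetT T r c == 0 then
          let tmp_cnt := pvCntA n g r c
          if tmp_cnt > 0 then
            let tmp_odl := max |r - PySem.Int.floordiv n 2| |c - PySem.Int.floordiv n 2|
            if pvLeInf tmp_odl st.1 && pvGeNegInf tmp_cnt st.2.1 then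
              (some tmp_odl, some tmp_cnt, r, c)
            else st
          else st
        else st) st) (none, none, 0, 0)
  (st.2.2.1, st.2.2.2)

-- ===== PORT B =====
-- the bounds test `0 <= x < n and 0 <= y < n` of B
def pvInbB (n x y : Int) : Bool := decide (0 ≤ x ∧ x < n ∧ 0 ≤ y ∧ y < n)

-- B's helper `attacked(x, y)`: rescan the 8 offsets looking for a knight
def pvAttacked (T : List (List Int)) (n x y : Int) : Bool :=
  pvOffs.any (fun d => pvInbB n (x + d.1) (y + d.2) && (pvGetT T (x + d.1) (y + d.2) == 1))

-- B's `tmp_cnt = sum(1 for ... if ...)`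
def pvCntB (T : List (List Int)) (n : Int) (r c : Int) : Int :=
  ((pvOffs.filter (fun d =>
      pvInbB n (r + d.1) (c + d.2) && !(pvAttacked T n (r + d.1) (c + d.2)))).length : Int)

def place_alt (T : List (List Int)) : Int × Int :=
  let n : Int := PySem.List.len T
  let st : Option Int × Option Int × Int × Int :=
    (PySem.List.pyRange 0 n 1).foldl (fun st r =>
      (PySem.List.pyRange 0 n 1).foldl (fun st c =>
        if pvGetT T r c == 0 then
          let tmp_cnt := pvCntB T n r c
          if tmp_cnt > 0 then
            let tmp_odl := max |r - PySem.Int.floordiv n 2| |c - PySem.Int.floordiv n 2|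
            if pvLeInf tmp_odl st.1 && pvGeNegInf tmp_cnt st.2.1 then
              (some tmp_odl, some tmp_cnt, r, c)
            else st
          else st
        else st) st) (none, none, 0, 0)
  (st.2.2.1, st.2.2.2)

-- ===== PRECONDITION & SPEC =====
-- A indexes T[r][c] for all r, c < len(T); it raises IndexError iff some row is shorter than T itself.
def Pre_place (T : List (List Int)) : Prop := ∀ row ∈ T, T.length ≤ row.length
instance (T : List (List Int)) : Decidable (Pre_place T) := by unfold Pre_place; infer_instance

def pvWitness_place : List (List Int) := [[0, 0], [1, 0]]

def Spec_place (T : List (List Int)) (out : Int × Int) : Prop := out = place_alt T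
instance (T : List (List Int)) (out : Int × Int) : Decidable (Spec_place T out) := by unfold Spec_place; infer_instance

-- ===== CLAIM (what is proved, stated in full; the proofs are below) =====
def Claim_equal_place : Prop := ∀ (T : List (List Int)), Dom_place T → Pre_place T → Spec_place T (place T)

-- ===== LEMMAS AND PROOFS =====

-- the two bounds tests agree
theorem pv_inb_eq (n x y : Int) : pvInbA n x y = pvInbB n x y := by
  simp only [pvInbA, pvInbB, decide_eq_decide]; omega

-- the offset list is closed under negation
theorem pv_neg_mem : ∀ d ∈ pvOffs, (-d.1, -d.2) ∈ pvOffs := by decide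

-- the flat list of table updates A performs, and one update step
def pvU (T : List (List Int)) (n : Int) : List ((Int × Int) × (Int × Int)) :=
  (PySem.List.pyRange 0 n 1).flatMap (fun r =>
    (PySem.List.pyRange 0 n 1).flatMap (fun c =>
      if pvGetT T r c == 1 then pvOffs.map (fun d => ((r, c), d)) else []))

def pvStep (n : Int) (g : List (List Bool)) (u : (Int × Int) × (Int × Int)) : List (List Bool) :=
  if pvInbA n (u.1.1 + u.2.1) (u.1.2 + u.2.2) then pvSetSz g (u.1.1 + u.2.1) (u.1.2 + u.2.2) else g

theorem pv_build_eq (T : List (List Int)) (n : Int) :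
    pvBuild T n = (pvU T n).foldl (pvStep n) (pvInit n) := by
  unfold pvBuild pvU
  rw [List.foldl_flatMap]
  refine PySem.List.foldl_congr_mem _ _ _ _ (fun g r _ => ?_)
  rw [List.foldl_flatMap]
  refine PySem.List.foldl_congr_mem _ _ _ _ (fun g' c _ => ?_)
  cases h : pvGetT T r c == 1
  · simp
  · simp [pvStep, List.foldl_map]

-- grid shape: n rows, each of length n
def pvSh (n : Int) (g : List (List Bool)) : Prop :=
  g.length = n.toNat ∧ ∀ row ∈ g, row.length = n.toNat

theorem pv_sh_init (n : Int) : pvSh n (pvInit n) := by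
  constructor
  · simp [pvInit, PySem.List.length_pyRange_one]
  · intro row hrow
    simp only [pvInit, List.mem_map] at hrow
    obtain ⟨_, _, rfl⟩ := hrow
    simp [PySem.List.length_pyRange_one]

theorem pv_getSz_init (n x y : Int) : pvGetSz (pvInit n) x y = false := by
  have hrow : ∀ (l : List Bool), (∀ b ∈ l, b = false) → PySem.List.pyGetD l y false = false := by
    intro l hl
    by_cases h : PySem.Raise.InRange l.length y
    · exact hl _ (PySem.List.pyGetD_mem l false h)
    · exact PySem.List.pyGetD_of_none l y false ((PySem.List.pyGet?_eq_none_iff _ _).mpr h)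
  apply hrow
  intro b hb
  have : ∀ (l : List (List Bool)), (∀ r ∈ l, ∀ b ∈ r, b = false) →
      ∀ b ∈ PySem.List.pyGetD l x ([] : List Bool), b = false := by
    intro l hl
    by_cases h : PySem.Raise.InRange l.length x
    · exact hl _ (PySem.List.pyGetD_mem l [] h)
    · rw [PySem.List.pyGetD_of_none l x [] ((PySem.List.pyGet?_eq_none_iff _ _).mpr h)]; simp
  refine this (pvInit n) ?_ b hb
  intro r hr b' hb'
  simp only [pvInit, List.mem_map] at hr
  obtain ⟨_, _, rfl⟩ := hr
  simp only [List.mem_map] at hb'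
  obtain ⟨_, _, rfl⟩ := hb'
  rfl

theorem pv_sh_setSz {n : Int} {g : List (List Bool)} (hg : pvSh n g) (x y : Int)
    (hx0 : 0 ≤ x) (hxn : x < n) (hy0 : 0 ≤ y) : pvSh n (pvSetSz g x y) := by
  obtain ⟨hlen, hrows⟩ := hg
  have hxlt : x.toNat < g.length := by omega
  constructor
  · simp [pvSetSz, PySem.List.pySetD_of_nonneg _ _ hx0, hlen]
  · intro row hrow
    simp only [pvSetSz, PySem.List.pySetD_of_nonneg _ _ hx0] at hrow
    rcases List.mem_or_eq_of_mem_set hrow with h | rfl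
    · exact hrows _ h
    · rw [PySem.List.pySetD_of_nonneg _ _ hy0, List.length_set,
          PySem.List.pyGetD_eq_getElem _ _ hx0 (by omega)]
      exact hrows _ (List.getElem_mem _)

theorem pv_getSz_setSz {n : Int} {g : List (List Bool)} (hg : pvSh n g)
    {x y a b : Int} (hx0 : 0 ≤ x) (hxn : x < n) (hy0 : 0 ≤ y)
    (ha0 : 0 ≤ a) (han : a < n) (hb0 : 0 ≤ b) (hbn : b < n) :
    pvGetSz (pvSetSz g x y) a b = if a = x ∧ b = y then true else pvGetSz g a b := by
  obtain ⟨hlen, hrows⟩ := hg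
  have hxlt : x.toNat < g.length := by omega
  have halt : a.toNat < g.length := by omega
  have hrowx : (g[x.toNat]).length = n.toNat := hrows _ (List.getElem_mem _)
  have hrowa : (g[a.toNat]).length = n.toNat := hrows _ (List.getElem_mem _)
  unfold pvGetSz pvSetSz
  rw [PySem.List.pyGetD_eq_getElem g ([] : List Bool) hx0 (by omega),
      PySem.List.pySetD_of_nonneg _ _ hx0, PySem.List.pySetD_of_nonneg _ _ hy0,
      PySem.List.pyGetD_eq_getElem _ ([] : List Bool) ha0
        (by simp only [List.length_set]; omega),
      List.getElem_set]
  by_cases hax : x.toNat = a.toNat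
  · rw [if_pos hax,
        PySem.List.pyGetD_eq_getElem _ _ hb0 (by rw [List.length_set]; omega),
        List.getElem_set]
    by_cases hby : y.toNat = b.toNat
    · rw [if_pos hby, if_pos (by omega)]
    · rw [if_neg hby, if_neg (by omega),
          PySem.List.pyGetD_eq_getElem g ([] : List Bool) ha0 (by omega),
          PySem.List.pyGetD_eq_getElem (g[a.toNat]) false hb0 (by omega)]
      simp only [hax]
  · rw [if_neg hax, if_neg (by omega),
        PySem.List.pyGetD_eq_getElem g ([] : List Bool) ha0 (by omega)]

theorem pv_sh_step {n : Int} {g : List (List Bool)} (hg : pvSh n g) (u : (Int × Int) × (Int × Int)) :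
    pvSh n (pvStep n g u) := by
  unfold pvStep
  split
  · next h =>
    have h' := of_decide_eq_true h
    exact pv_sh_setSz hg _ _ (by omega) (by omega) (by omega)
  · exact hg

-- what a square of the table holds after a list of update steps
theorem pv_getSz_foldl (n a b : Int) (ha0 : 0 ≤ a) (han : a < n) (hb0 : 0 ≤ b) (hbn : b < n) :
    ∀ (L : List ((Int × Int) × (Int × Int))) (g : List (List Bool)), pvSh n g →
    pvGetSz (L.foldl (pvStep n) g) a b =
      (pvGetSz g a b || L.any (fun u =>
        pvInbA n (u.1.1 + u.2.1) (u.1.2 + u.2.2) &&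
          decide (u.1.1 + u.2.1 = a ∧ u.1.2 + u.2.2 = b))) := by
  intro L
  induction L with
  | nil => intro g _; simp
  | cons u L ih =>
    intro g hg
    rw [List.foldl_cons, ih _ (pv_sh_step hg u), List.any_cons]
    have hstep : pvGetSz (pvStep n g u) a b =
        (pvGetSz g a b || (pvInbA n (u.1.1 + u.2.1) (u.1.2 + u.2.2) &&
          decide (u.1.1 + u.2.1 = a ∧ u.1.2 + u.2.2 = b))) := by
      unfold pvStep
      by_cases h : pvInbA n (u.1.1 + u.2.1) (u.1.2 + u.2.2)
      · have h' := of_decide_eq_true (by simpa [pvInbA] using h)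
        rw [if_pos h, pv_getSz_setSz hg (by omega) (by omega) (by omega) ha0 han hb0 hbn, h]
        by_cases he : u.1.1 + u.2.1 = a ∧ u.1.2 + u.2.2 = b
        · rw [if_pos ⟨he.1.symm, he.2.symm⟩]
          simp [he]
        · rw [if_neg (fun hc => he ⟨hc.1.symm, hc.2.symm⟩)]
          simp [he]
      · simp [h]
    rw [hstep, Bool.or_assoc]

-- characterization: the table A builds equals B's rescan, on in-board squares
theorem pv_char (T : List (List Int)) (n a b : Int)
    (ha0 : 0 ≤ a) (han : a < n) (hb0 : 0 ≤ b) (hbn : b < n) :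
    pvGetSz (pvBuild T n) a b = pvAttacked T n a b := by
  rw [pv_build_eq, pv_getSz_foldl n a b ha0 han hb0 hbn _ _ (pv_sh_init n),
      pv_getSz_init, Bool.false_or]
  rw [Bool.eq_iff_iff, List.any_eq_true]
  unfold pvAttacked
  rw [List.any_eq_true]
  constructor
  · rintro ⟨u, hu, hP⟩
    rw [Bool.and_eq_true, decide_eq_true_eq] at hP
    obtain ⟨hin, hta, htb⟩ := hP
    simp only [pvU, List.mem_flatMap] at hu
    obtain ⟨r, hr, c, hc, hu⟩ := hu
    rw [PySem.List.mem_pyRange_one] at hr hc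
    by_cases h1 : pvGetT T r c == 1
    · rw [if_pos h1, List.mem_map] at hu
      obtain ⟨d, hd, rfl⟩ := hu
      simp only at hta htb hin
      refine ⟨(-d.1, -d.2), pv_neg_mem d hd, ?_⟩
      rw [Bool.and_eq_true]
      constructor
      · simp only [pvInbB, decide_eq_true_eq]; omega
      · have hra : a + -d.1 = r := by omega
        have hcb : b + -d.2 = c := by omega
        rw [hra, hcb]; exact h1
    · rw [if_neg h1] at hu; exact absurd hu (List.not_mem_nil)
  · rintro ⟨d, hd, hP⟩
    rw [Bool.and_eq_true, beq_iff_eq] at hP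
    obtain ⟨hin, hT⟩ := hP
    rw [pvInbB, decide_eq_true_eq] at hin
    refine ⟨((a + d.1, b + d.2), (-d.1, -d.2)), ?_, ?_⟩
    · simp only [pvU, List.mem_flatMap]
      refine ⟨a + d.1, ?_, b + d.2, ?_, ?_⟩
      · rw [PySem.List.mem_pyRange_one]; omega
      · rw [PySem.List.mem_pyRange_one]; omega
      · rw [if_pos (by simpa using hT), List.mem_map]
        exact ⟨(-d.1, -d.2), pv_neg_mem d hd, rfl⟩
    · simp only
      rw [Bool.and_eq_true, decide_eq_true_eq]
      refine ⟨?_, by omega⟩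
      simp only [pvInbA, decide_eq_true_eq]; omega

-- the two per-cell counts agree
theorem pv_cnt (T : List (List Int)) (n r c : Int) :
    pvCntA n (pvBuild T n) r c = pvCntB T n r c := by
  unfold pvCntA pvCntB
  rw [PySem.List.foldl_if_add_one, zero_add, ← List.countP_eq_length_filter]
  congr 1
  refine List.countP_congr (fun d _ => ?_)
  have hbd : (pvInbA n (r + d.1) (c + d.2) && !(pvGetSz (pvBuild T n) (r + d.1) (c + d.2)))
      = (pvInbB n (r + d.1) (c + d.2) && !(pvAttacked T n (r + d.1) (c + d.2))) := by
    by_cases hin : pvInbB n (r + d.1) (c + d.2) = true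
    · have h' := of_decide_eq_true (by simpa [pvInbB] using hin)
      rw [pv_inb_eq, hin,
          pv_char T n (r + d.1) (c + d.2) (by omega) (by omega) (by omega) (by omega)]
    · have hf : pvInbB n (r + d.1) (c + d.2) = false := by
        cases hx : pvInbB n (r + d.1) (c + d.2) with
        | false => rfl
        | true => exact absurd hx hin
      rw [pv_inb_eq, hf]; simp
  rw [hbd]

-- ===== VERDICT (by name: the statement is the Claim_ definition above) =====
theorem place_spec : Claim_equal_place := by
  intro T _ _
  unfold Spec_place place place_alt
  simp only [pv_cnt]
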